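-- pv_equiv track=rewrite | github.com/kunalmody24/B-GAP-Behavior-Guided-Action-Prediction-and-Navigation-for-Autonomous-Driving | get-stats.py | get_num_lane_changes
-- ===== SOURCE A (Python) =====
-- def get_num_lane_changes(action_list):
--     lane_change_actions = [0, 2]
--     lane_changes = 0
--
--     # can only make at most 4 lane changes in the same direction
--     direction_change = 0
--     curr_direction = -1
--     for action in action_list:
--         if action in lane_change_actions:
--             if action != curr_direction:
--                 curr_direction = action
--                 lane_changes += 1
--                 direction_change = 1
--             elif action == curr_direction and direction_change < 3:
--                 lane_changes += 1
--                 direction_change += 1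
--     return lane_changes
-- ===== SOURCE B (Python) =====
-- def get_num_lane_changes(action_list):
--     f = [a for a in action_list if a in (0, 2)]
--     return sum(1 for j in range(len(f))
--                if j < 3 or not (f[j - 3] == f[j - 2] == f[j - 1] == f[j]))
-- ===== Notes on version B (the rewrite author's own statement) =====
-- stated objective: alternative
-- what changed: Replaces A's curr_direction/direction_change mutable state machine with two staged passes: filter the lane-change actions, then count indices j of the filtered list satisfying a stateless lookback test (j < 3 or the three preceding filtered entries do not all equal f[j]).
import Mathlib
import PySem

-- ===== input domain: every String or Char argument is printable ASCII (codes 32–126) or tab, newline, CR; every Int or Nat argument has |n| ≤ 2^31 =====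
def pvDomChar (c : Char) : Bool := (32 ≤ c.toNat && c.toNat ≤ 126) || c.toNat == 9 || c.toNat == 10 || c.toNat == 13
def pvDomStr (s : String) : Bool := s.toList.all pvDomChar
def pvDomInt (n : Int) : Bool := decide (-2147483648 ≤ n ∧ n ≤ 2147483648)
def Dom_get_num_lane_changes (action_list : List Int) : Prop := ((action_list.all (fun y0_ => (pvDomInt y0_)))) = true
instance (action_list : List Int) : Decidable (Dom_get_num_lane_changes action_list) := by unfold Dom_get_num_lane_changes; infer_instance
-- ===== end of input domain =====

-- B replaces A's direction/counter state machine by a filter pass followed by a per-index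
-- lookback test (an element counts unless its three predecessors in the filtered list equal it).

-- ===== PORT A =====
-- state = (lane_changes, direction_change, curr_direction), as in A's loop
def pvAStep (s : Int × Int × Int) (action : Int) : Int × Int × Int :=
  if action == 0 || action == 2 then
    if action ≠ s.2.2 then (s.1 + 1, 1, action)
    else if action == s.2.2 && s.2.1 < 3 then (s.1 + 1, s.2.1 + 1, s.2.2)
    else s
  else s

def get_num_lane_changes (action_list : List Int) : Int :=
  (action_list.foldl pvAStep (0, 0, -1)).1

-- ===== PORT B =====
-- B's lookback condition at index i of f: i < 3 or not (f[i-3] == f[i-2] == f[i-1] == f[i])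
def pvPred (f : List Int) (i : Nat) : Bool :=
  decide (i < 3) ||
    !((f.getD (i - 3) 0 == f.getD (i - 2) 0) && (f.getD (i - 2) 0 == f.getD (i - 1) 0) &&
      (f.getD (i - 1) 0 == f.getD i 0))

def get_num_lane_changes_alt (action_list : List Int) : Int :=
  let f := action_list.filter (fun a => a == 0 || a == 2)
  Int.ofNat ((List.range f.length).countP (fun j => pvPred f j))

-- ===== PRECONDITION & SPEC =====
def Spec_get_num_lane_changes (action_list : List Int) (out : Int) : Prop := out = get_num_lane_changes_alt action_list
instance (action_list : List Int) (out : Int) : Decidable (Spec_get_num_lane_changes action_list out) := by unfold Spec_get_num_lane_changes; infer_instance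

-- ===== CLAIM (what is proved, stated in full; the proofs are below) =====
def Claim_equal_get_num_lane_changes : Prop := ∀ (action_list : List Int), Dom_get_num_lane_changes action_list → Spec_get_num_lane_changes action_list (get_num_lane_changes action_list)

-- ===== LEMMAS AND PROOFS =====

-- A's per-step counting, parametrised by the current direction and direction_change counter
def pvAux (cd dc : Int) : List Int → Int
  | [] => 0
  | y :: ys =>
    if y ≠ cd then 1 + pvAux y 1 ys
    else if dc < 3 then 1 + pvAux cd (dc + 1) ys
    else pvAux cd dc ys

-- non-lane actions leave A's state unchanged, so the fold equals the fold over the filtered list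
theorem pvFold_filter (xs : List Int) : ∀ s : Int × Int × Int,
    xs.foldl pvAStep s = (xs.filter (fun a => a == 0 || a == 2)).foldl pvAStep s := by
  induction xs with
  | nil => intro s; rfl
  | cons x xs ih =>
    intro s
    by_cases h : (x == 0 || x == 2) = true
    · simp only [List.foldl_cons, List.filter_cons, h, if_true]
      exact ih _
    · simp only [List.foldl_cons, List.filter_cons, h]
      rw [show pvAStep s x = s from by simp [pvAStep, h]]
      exact ih s

-- on a list of lane-change actions only, A's fold counts pvAux
theorem pvFold_eq_aux (xs : List Int) : ∀ lc dc cd, (∀ x ∈ xs, x = 0 ∨ x = 2) →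
    (xs.foldl pvAStep (lc, dc, cd)).1 = lc + pvAux cd dc xs := by
  induction xs with
  | nil => intro lc dc cd _; simp [pvAux]
  | cons x xs ih =>
    intro lc dc cd hall
    have hx : x = 0 ∨ x = 2 := hall x (by simp)
    have hxs : ∀ y ∈ xs, y = 0 ∨ y = 2 := fun y hy => hall y (by simp [hy])
    have hguard : (x == 0 || x == 2) = true := by rcases hx with h | h <;> simp [h]
    rw [List.foldl_cons]
    by_cases h : x = cd
    · subst h
      rw [show pvAStep (lc, dc, x) x = if dc < 3 then (lc + 1, dc + 1, x) else (lc, dc, x) from by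
          simp [pvAStep, hguard]]
      by_cases h3 : dc < 3
      · rw [if_pos h3, ih (lc + 1) (dc + 1) x hxs]
        simp only [pvAux, ne_eq, not_true_eq_false, if_false, if_pos h3]
        ring
      · rw [if_neg h3, ih lc dc x hxs]
        simp only [pvAux, ne_eq, not_true_eq_false, if_false, if_neg h3]
    · rw [show pvAStep (lc, dc, cd) x = (lc + 1, 1, x) from by simp [pvAStep, hguard, h]]
      rw [ih (lc + 1) 1 x hxs]
      simp only [pvAux, ne_eq, h, not_false_eq_true, if_true]
      ring

-- "the last three emitted lane actions (most recent first in h) all equal x"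
def pvHistOk (h : List Int) (x : Int) : Bool :=
  decide (3 ≤ h.length) && (h.getD 0 0 == x) && (h.getD 1 0 == x) && (h.getD 2 0 == x)

-- B's count, re-expressed structurally with an explicit history of emitted actions
def pvHistCnt : List Int → List Int → Int
  | _, [] => 0
  | h, x :: xs => (if pvHistOk h x then 0 else 1) + pvHistCnt (x :: h) xs

theorem pvChainEq (a b c x : Int) :
    ((a == b) && (b == c) && (c == x)) = ((c == x) && (b == x) && (a == x)) := by
  rw [Bool.eq_iff_iff]
  simp only [Bool.and_eq_true, beq_iff_eq]
  omega

-- head step of the bridge: B's lookback test at index |pre| is the history test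
theorem pvPred_head (pre : List Int) (x : Int) (xs : List Int) :
    pvPred (pre ++ x :: xs) pre.length = !pvHistOk pre.reverse x := by
  by_cases hs : pre.length < 3
  · simp [pvPred, pvHistOk, hs]
  · have hs3 : 3 ≤ pre.length := by omega
    have hx : (pre ++ x :: xs).getD pre.length 0 = x := by
      simp [List.getD]
    have hk : ∀ k, 1 ≤ k → k ≤ 3 →
        (pre ++ x :: xs).getD (pre.length - k) 0 = pre.getD (pre.length - k) 0 := by
      intro k h1 h3
      exact List.getD_append _ _ _ _ (by omega)
    have hr : ∀ k, k < 3 → pre.reverse.getD k 0 = pre.getD (pre.length - 1 - k) 0 := by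
      intro k hk3
      simp [List.getD, List.getElem?_reverse (show k < pre.length by omega)]
    have e1 : pre.length - 1 - 0 = pre.length - 1 := by omega
    have e2 : pre.length - 1 - 1 = pre.length - 2 := by omega
    have e3 : pre.length - 1 - 2 = pre.length - 3 := by omega
    simp only [pvPred, pvHistOk, hs, decide_false, Bool.false_or,
      List.length_reverse, hs3, decide_true, Bool.true_and,
      hx, hk 1 (by omega) (by omega), hk 2 (by omega) (by omega), hk 3 (by omega) (by omega),
      hr 0 (by omega), hr 1 (by omega), hr 2 (by omega), e1, e2, e3]
    rw [pvChainEq]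

-- the indexed count over range equals the history-based structural count
theorem pvBridge (f : List Int) : ∀ pre : List Int,
    (Int.ofNat ((List.range f.length).countP (fun j => pvPred (pre ++ f) (pre.length + j)))) =
      pvHistCnt pre.reverse f := by
  induction f with
  | nil => intro pre; simp [pvHistCnt]
  | cons x xs ih =>
    intro pre
    rw [show (x :: xs).length = xs.length + 1 from rfl, List.range_succ_eq_map,
      List.countP_cons, List.countP_map]
    have hfun : ((fun j => pvPred (pre ++ x :: xs) (pre.length + j)) ∘ Nat.succ) =
        (fun j => pvPred ((pre ++ [x]) ++ xs) ((pre ++ [x]).length + j)) := by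
      funext j
      have h1 : pre.length + Nat.succ j = (pre ++ [x]).length + j := by
        simp; omega
      have h2 : pre ++ x :: xs = (pre ++ [x]) ++ xs := by simp
      simp only [Function.comp, h1, h2]
    rw [hfun, show pre.length + 0 = pre.length from rfl, pvPred_head]
    have hrev : (pre ++ [x]).reverse = x :: pre.reverse := by simp
    have := ih (pre ++ [x])
    rw [hrev] at this
    rw [show pvHistCnt pre.reverse (x :: xs) =
        (if pvHistOk pre.reverse x then 0 else 1) + pvHistCnt (x :: pre.reverse) xs from rfl,
      ← this]
    by_cases h : pvHistOk pre.reverse x = true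
    · simp [h]
    · simp [h]
      ring

-- the takeWhile run length is ≥ 3 exactly when the history test fires
theorem pvTw_ge3 (h : List Int) (cd : Int) :
    3 ≤ (h.takeWhile (fun y => y == cd)).length ↔ pvHistOk h cd = true := by
  match h with
  | [] => simp [pvHistOk]
  | [a] =>
    by_cases ha : a = cd <;> simp [pvHistOk, ha]
  | [a, b] =>
    by_cases ha : a = cd <;> by_cases hb : b = cd <;>
      simp [pvHistOk, ha, hb]
  | a :: b :: c :: t =>
    by_cases ha : a = cd <;> by_cases hb : b = cd <;> by_cases hc : c = cd <;>
      simp [pvHistOk, ha, hb, hc, List.getD]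

-- the history count equals A's counting function, via the run-length invariant
theorem pvHist_eq_aux (xs : List Int) : ∀ (h : List Int) (cd dc : Int),
    (∀ y ∈ xs, y = 0 ∨ y = 2) →
    dc = ((min 3 (h.takeWhile (fun y => y == cd)).length : Nat) : Int) →
    (h = [] → cd = -1) →
    (∀ c t, h = c :: t → c = cd) →
    pvHistCnt h xs = pvAux cd dc xs := by
  induction xs with
  | nil => intro h cd dc _ _ _ _; rfl
  | cons x xs ih =>
    intro h cd dc hall hdc hnil hhead
    have hxs : ∀ y ∈ xs, y = 0 ∨ y = 2 := fun y hy => hall y (by simp [hy])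
    by_cases hcd : x = cd
    · subst hcd
      by_cases h3 : (h.takeWhile (fun y => y == x)).length < 3
      · have hok : pvHistOk h x = false := by
          cases hEq : pvHistOk h x
          · rfl
          · exact absurd ((pvTw_ge3 h x).mpr hEq) (by omega)
        have hdc3 : dc < 3 := by rw [hdc]; push_cast; omega
        rw [show pvHistCnt h (x :: xs) = (if pvHistOk h x then 0 else 1) + pvHistCnt (x :: h) xs
            from rfl, hok]
        simp only [pvAux, ne_eq, not_true_eq_false, if_false, if_pos hdc3]
        rw [ih (x :: h) x (dc + 1) hxs
          (by simp only [List.takeWhile_cons, beq_self_eq_true, if_true, List.length_cons]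
              rw [hdc]; push_cast; omega)
          (by intro he; cases he)
          (by intro c t he; injection he with h1 _; exact h1.symm)]
        simp
      · have hok : pvHistOk h x = true := (pvTw_ge3 h x).mp (by omega)
        have hdc3 : ¬ dc < 3 := by rw [hdc]; push_cast; omega
        rw [show pvHistCnt h (x :: xs) = (if pvHistOk h x then 0 else 1) + pvHistCnt (x :: h) xs
            from rfl, hok]
        simp only [pvAux, ne_eq, not_true_eq_false, if_false, if_neg hdc3]
        rw [ih (x :: h) x dc hxs
          (by simp only [List.takeWhile_cons, beq_self_eq_true, if_true, List.length_cons]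
              rw [hdc]; push_cast; omega)
          (by intro he; cases he)
          (by intro c t he; injection he with h1 _; exact h1.symm)]
        simp
    · have hcne : ∀ c t, h = c :: t → (c == x) = false := by
        intro c t he
        have hc : c = cd := hhead c t he
        subst hc
        simp only [beq_eq_false_iff_ne, ne_eq]
        exact fun hce => hcd hce.symm
      have hok : pvHistOk h x = false := by
        match h with
        | [] => simp [pvHistOk]
        | c :: t => simp [pvHistOk, List.getD, hcne c t rfl]
      have htw : h.takeWhile (fun y => y == x) = [] := by
        match h with
        | [] => rfl
        | c :: t => simp [hcne c t rfl]
      rw [show pvHistCnt h (x :: xs) = (if pvHistOk h x then 0 else 1) + pvHistCnt (x :: h) xs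
          from rfl, hok]
      simp only [pvAux, ne_eq, hcd, not_false_eq_true, if_true]
      rw [ih (x :: h) x 1 hxs
        (by simp [htw])
        (by intro he; cases he)
        (by intro c t he; injection he with h1 _; exact h1.symm)]
      simp

-- ===== VERDICT (by name: the statement is the Claim_ definition above) =====
theorem get_num_lane_changes_spec : Claim_equal_get_num_lane_changes := by
  intro al _
  unfold Spec_get_num_lane_changes get_num_lane_changes get_num_lane_changes_alt
  set f := al.filter (fun a => a == 0 || a == 2) with hf
  have hall : ∀ x ∈ f, x = 0 ∨ x = 2 := by
    intro x hx
    have := List.of_mem_filter hx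
    rcases Bool.or_eq_true_iff.mp this with h | h <;> [left; right] <;> exact beq_iff_eq.mp h
  rw [pvFold_filter, ← hf, pvFold_eq_aux _ 0 0 (-1) hall]
  have hb := pvBridge f []
  simp only [List.nil_append, List.length_nil, Nat.zero_add, List.reverse_nil] at hb
  rw [hb, pvHist_eq_aux f [] (-1) 0 hall (by simp) (fun _ => rfl) (by intro c t h; cases h)]
  ring
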